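-- pv_equiv track=rewrite | github.com/yurrrri/university_homework_backup | python_basic_programming/assignment08.py | D3
-- ===== SOURCE A (Python) =====
-- def D3(s):
--     '''
--         매개변수 s에 대한 감점 기준 D3에 대한 점수를 계산하여 반환
--     s : 문자열
--     '''
--     s=str(s)
--     d3_n=len(s)
--     m=0
--
--     for k in range(d3_n):
--         x=s[k]
--         y=s.count(x)
--
--         if y==1:
--             m+=1
--
--     d3=3*(d3_n-m)
--
--     return d3
-- ===== SOURCE B (Python) =====
-- def D3(s):
--     '''D3 score via sort-then-scan: sort the characters so equal ones are
--     adjacent, then sum the lengths of runs longer than 1 in a single scan;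
--     the score is 3 times that sum.'''
--     s = str(s)
--     t = sorted(s)
--     n = len(t)
--     total = 0
--     i = 0
--     while i < n:
--         j = i + 1
--         while j < n and t[j] == t[i]:
--             j += 1
--         if j - i > 1:
--             total += j - i
--         i = j
--     return 3 * total
-- ===== Notes on version B (the rewrite author's own statement) =====
-- stated objective: faster
-- what changed: B sorts the characters once so equal characters become adjacent, then a single scan over the sorted list sums the lengths of runs longer than 1, replacing A's per-position rescan of the whole string with s.count.
import Mathlib
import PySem

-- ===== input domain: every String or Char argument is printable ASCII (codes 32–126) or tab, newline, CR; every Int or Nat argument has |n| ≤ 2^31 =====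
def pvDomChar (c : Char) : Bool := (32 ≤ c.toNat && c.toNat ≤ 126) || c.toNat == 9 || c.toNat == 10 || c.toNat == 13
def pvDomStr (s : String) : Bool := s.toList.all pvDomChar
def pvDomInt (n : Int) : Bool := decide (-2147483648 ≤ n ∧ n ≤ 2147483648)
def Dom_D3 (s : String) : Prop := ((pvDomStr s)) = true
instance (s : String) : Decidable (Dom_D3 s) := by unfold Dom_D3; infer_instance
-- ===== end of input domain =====

-- B sorts the characters once so equal ones are adjacent, then one scan sums the
-- lengths of runs longer than 1, instead of A's per-position rescan with s.count (objective: faster).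

-- ===== PORT A =====
def D3 (s : String) : Int :=
  let l := s.toList
  let d3_n : Int := PySem.List.len l                     -- d3_n = len(s)
  let m : Int := (PySem.List.pyRange 0 d3_n 1).foldl
    (fun m k =>
      let x := PySem.List.pyGetD l k ' '                 -- x = s[k]  (k is always in range)
      let y := PySem.Chars.count l [x]                   -- y = s.count(x)  (x is one character)
      if y = 1 then m + 1 else m) 0
  3 * (d3_n - m)

-- ===== PORT B =====
-- the two nested while loops of Source B: the outer loop consumes one run per step
-- (takeWhile/dropWhile is the inner 'while t[j] == t[i]: j += 1' scan)
def runSum : List Char → Int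
  | [] => 0
  | x :: rest =>
      let run := rest.takeWhile (fun c => c == x)
      let j : Int := 1 + run.length                       -- j - i, the run length
      (if j > 1 then j else 0) + runSum (rest.dropWhile (fun c => c == x))
termination_by l => l.length
decreasing_by
  simpa using Nat.lt_succ_of_le (List.length_dropWhile_le _ _)

def D3_alt (s : String) : Int :=
  let t := PySem.List.sorted s.toList (fun c => c) false  -- t = sorted(s)
  3 * runSum t

-- ===== PRECONDITION & SPEC =====
def Spec_D3 (s : String) (out : Int) : Prop := out = D3_alt s
instance (s : String) (out : Int) : Decidable (Spec_D3 s out) := by unfold Spec_D3; infer_instance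

-- ===== CLAIM (what is proved, stated in full; the proofs are below) =====
def Claim_equal_D3 : Prop := ∀ (s : String), Dom_D3 s → Spec_D3 s (D3 s)

-- ===== LEMMAS AND PROOFS =====

-- Python's str.count with a one-character needle is the character count.
theorem count_go_singleton (c : Char) (l : List Char) : ∀ (fuel : Nat) (acc : Nat), l.length ≤ fuel →
    PySem.Chars.count.go [c] fuel l acc = acc + l.count c := by
  induction l with
  | nil => intro fuel acc h; cases fuel <;> simp [PySem.Chars.count.go]
  | cons x t ih =>
    intro fuel acc h
    cases fuel with
    | zero => simp at h
    | succ f =>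
      rw [PySem.Chars.count.go]
      by_cases hx : x = c
      · subst hx
        simp [List.isPrefixOf, ih f _ (by simpa using h)]
        omega
      · simp [List.isPrefixOf, hx, Ne.symm hx, ih f _ (by simpa using h)]

theorem chars_count_singleton (l : List Char) (c : Char) :
    PySem.Chars.count l [c] = l.count c := by
  simpa [PySem.Chars.count] using count_go_singleton c l l.length 0 le_rfl

-- A computes 3 * (length - number of singleton positions).
theorem A_eq (s : String) :
    D3 s = 3 * ((s.toList.length : Int) -
      (s.toList.countP (fun x => decide (s.toList.count x = 1)) : Int)) := by
  show
    (let l := s.toList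
     let d3_n : Int := PySem.List.len l
     let m : Int := (PySem.List.pyRange 0 d3_n 1).foldl
       (fun m k =>
         let x := PySem.List.pyGetD l k ' '
         let y := PySem.Chars.count l [x]
         if y = 1 then m + 1 else m) 0
     3 * (d3_n - m)) = _
  simp only []
  set l := s.toList with hl
  rw [PySem.List.foldl_pyRange_zero_pyGetD l ' '
        (fun m x => if PySem.Chars.count l [x] = 1 then m + 1 else m) 0]
  rw [PySem.List.foldl_ite_add_one (fun x => PySem.Chars.count l [x] = 1) l 0]
  have : l.countP (fun x => decide (PySem.Chars.count l [x] = 1))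
      = l.countP (fun x => decide (l.count x = 1)) := by
    apply List.countP_congr
    intro x _
    simp [chars_count_singleton]
  rw [this]
  simp [PySem.List.len]

-- On a sorted (pairwise ≤) list, the run scan computes length minus the
-- number of singleton positions.
theorem runSum_sorted (t : List Char) (hs : t.Pairwise (· ≤ ·)) :
    runSum t = (t.length : Int) - (t.countP (fun x => decide (t.count x = 1)) : Int) := by
  induction t using runSum.induct with
  | case1 => simp [runSum]
  | case2 x rest ih =>
    have hrs : runSum (x :: rest)
        = (if ((1 : Int) + (rest.takeWhile (fun c => c == x)).length) > 1
            then (1 : Int) + (rest.takeWhile (fun c => c == x)).length else 0)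
          + runSum (rest.dropWhile (fun c => c == x)) := by rw [runSum]
    set run := rest.takeWhile (fun c => c == x) with hrundef
    set d := rest.dropWhile (fun c => c == x) with hddef
    have hsplit : rest = run ++ d := (List.takeWhile_append_dropWhile).symm
    have hrun_all : ∀ y ∈ run, y = x := by
      intro y hy
      have := List.mem_takeWhile_imp (hrundef ▸ hy)
      simpa using this
    have hrest : rest.Pairwise (· ≤ ·) := (List.pairwise_cons.1 hs).2
    have hx_le : ∀ y ∈ rest, x ≤ y := (List.pairwise_cons.1 hs).1
    have hd_sorted : d.Pairwise (· ≤ ·) :=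
      List.Pairwise.sublist (List.dropWhile_sublist _) hrest
    have hd_ne : ∀ y ∈ d, y ≠ x := by
      intro y hy
      cases hdd : d with
      | nil => rw [hdd] at hy; simp at hy
      | cons h0 dt =>
        have hh0 : ¬ (h0 = x) := by
          have h := List.head?_dropWhile_not (fun c => c == x) rest
          rw [← hddef, hdd] at h
          simpa using h
        have hh0mem : h0 ∈ rest := by
          rw [hsplit, hdd]; simp
        have hx_lt : x < h0 := lt_of_le_of_ne (hx_le h0 hh0mem) (Ne.symm hh0)
        rw [hdd] at hy
        rcases List.mem_cons.1 hy with h | h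
        · subst h; exact hh0
        · have : h0 ≤ y := by
            rw [hdd] at hd_sorted
            exact (List.pairwise_cons.1 hd_sorted).1 y h
          exact fun hxy => absurd (hxy ▸ this) (not_le.2 hx_lt)
    clear_value run d
    have hd_count_x : d.count x = 0 := List.count_eq_zero.2 (fun h => hd_ne x h rfl)
    have hrun_count_x : run.count x = run.length := by
      rw [List.count_eq_length]; intro y hy; exact ((hrun_all y hy).symm ▸ rfl)
    have hcount_x : (x :: rest).count x = 1 + run.length := by
      rw [hsplit]
      simp [List.count_append, hrun_count_x, hd_count_x]
      omega
    have hcount_d : ∀ y ∈ d, (x :: rest).count y = d.count y := by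
      intro y hy
      have hyx := hd_ne y hy
      have hrun_y : run.count y = 0 :=
        List.count_eq_zero.2 (fun h => hyx (hrun_all y h))
      rw [hsplit]
      simp [List.count_append, hrun_y, Ne.symm hyx]
    have hd_countP : d.countP (fun y => decide ((x :: rest).count y = 1))
        = d.countP (fun y => decide (d.count y = 1)) := by
      apply List.countP_congr
      intro y hy
      simp [hcount_d y hy]
    have ihd := ih hd_sorted
    have hrun_countP : (x :: run).countP (fun y => decide ((x :: rest).count y = 1))
        = if run.length = 0 then 1 else 0 := by
      rcases Nat.eq_zero_or_pos run.length with h0 | hpos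
      · have hrn : run = [] := List.length_eq_zero_iff.1 h0
        subst hrn
        simp [hcount_x]
      · have hne : (1 : Nat) + run.length ≠ 1 := by omega
        have hrne : run ≠ [] := by intro h; rw [h] at hpos; simp at hpos
        have : (x :: run).countP (fun y => decide ((x :: rest).count y = 1)) = 0 := by
          rw [List.countP_eq_zero]
          intro y hy
          rcases List.mem_cons.1 hy with h | h
          · subst h; simp [hcount_x, hrne]
          · rw [hrun_all y h]; simp [hcount_x, hrne]
        rw [this]
        have : run.length ≠ 0 := by omega
        simp [this]
    have hcountP : (x :: rest).countP (fun y => decide ((x :: rest).count y = 1))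
        = (if run.length = 0 then 1 else 0) + d.countP (fun y => decide (d.count y = 1)) := by
      have hxr : (x :: rest) = (x :: run) ++ d := by rw [hsplit]; rfl
      rw [hxr, List.countP_append, ← hxr]
      rw [hrun_countP, hd_countP]
    rw [hrs, ihd, hcountP]
    have hlen : ((x :: rest).length : Int) = 1 + run.length + d.length := by
      rw [hsplit]; simp; ring
    rw [hlen]
    rcases Nat.eq_zero_or_pos run.length with h0 | hpos
    · simp [h0]
    · have h1 : (1 : Int) + run.length > 1 := by
        have : (0 : Int) < run.length := by exact_mod_cast hpos
        omega
      have h2 : run.length ≠ 0 := by omega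
      simp [h1, h2]
      ring

theorem D3_eq (s : String) : D3 s = D3_alt s := by
  rw [A_eq]
  show _ = 3 * runSum (PySem.List.sorted s.toList (fun c => c) false)
  set l := s.toList with hl
  set t := PySem.List.sorted l (fun c => c) false with ht
  have hperm : t.Perm l := PySem.List.sorted_perm l (fun c => c) false
  have hsorted : t.Pairwise (· ≤ ·) := by
    simpa using PySem.List.sorted_pairwise l (fun c => c)
  rw [runSum_sorted t hsorted]
  have hlen : t.length = l.length := hperm.length_eq
  have hcount : ∀ y, t.count y = l.count y := fun y => hperm.count_eq y
  have hcp : t.countP (fun x => decide (t.count x = 1))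
      = l.countP (fun x => decide (l.count x = 1)) := by
    calc t.countP (fun x => decide (t.count x = 1))
        = t.countP (fun x => decide (l.count x = 1)) := by
          apply List.countP_congr; intro y _; simp [hcount y]
      _ = l.countP (fun x => decide (l.count x = 1)) := hperm.countP_eq _
  rw [hlen, hcp]

-- ===== VERDICT (by name: the statement is the Claim_ definition above) =====
theorem D3_spec : Claim_equal_D3 := by
  intro s _
  unfold Spec_D3
  exact D3_eq s
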